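-- pv_equiv track=rewrite | github.com/oscarvalenzuelab/ossa_scanner | ossa_scanner/utils/package_manager.py | license_classificaton
-- ===== SOURCE A (Python) =====
-- def license_classificaton(licenses):
--     license_categories = {
--         "copyleft": ["GPL", "AGPL"],
--         "weak_copyleft": ["LGPL", "MPL", "EPL", "CDDL"],
--         "permissive": ["MIT", "BSD", "Apache"]
--     }
--     # Priority levels for each category
--     priority = {"copyleft": 1, "weak_copyleft": 2, "permissive": 3}
--     severity_map = {
--         "copyleft": ("High", "This package contains copyleft licenses, which impose strong obligations."),
--         "weak_copyleft": ("Medium", "This package contains weak copyleft licenses, which impose moderate obligations."),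
--         "permissive": ("Informational", "This package contains permissive licenses, which impose minimal obligations."),
--     }
--     # Split multiple licenses and normalize them
--     license_list = [l.strip() for l in licenses.split(",")]
--     current_priority = float("inf")
--     selected_severity = "Informational"
--     selected_reason = "PURL identification for OSSBOMER"
--     for license in license_list:
--         for category, patterns in license_categories.items():
--             if any(license.upper().startswith(pattern.upper()) for pattern in patterns):
--                 if priority[category] < current_priority:
--                     current_priority = priority[category]
--                     selected_severity, selected_reason = severity_map[category]
--
--     return selected_severity, selected_reason
-- ===== SOURCE B (Python) =====
-- def license_classificaton(licenses):
--     license_list = [l.strip() for l in licenses.split(",")]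
--     tiers = [
--         (["GPL", "AGPL"],
--          ("High", "This package contains copyleft licenses, which impose strong obligations.")),
--         (["LGPL", "MPL", "EPL", "CDDL"],
--          ("Medium", "This package contains weak copyleft licenses, which impose moderate obligations.")),
--         (["MIT", "BSD", "Apache"],
--          ("Informational", "This package contains permissive licenses, which impose minimal obligations.")),
--     ]
--     for patterns, result in tiers:
--         if any(lic.upper().startswith(pat.upper()) for lic in license_list for pat in patterns):
--             return result
--     return ("Informational", "PURL identification for OSSBOMER")
-- ===== Notes on version B (the rewrite author's own statement) =====
-- stated objective: simpler
-- what changed: Replaces the per-license min-priority accumulator (priority dict, running current_priority, severity_map lookups) with a single ordered scan over the three tiers that returns the first tier any license matches.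
import Mathlib
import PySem

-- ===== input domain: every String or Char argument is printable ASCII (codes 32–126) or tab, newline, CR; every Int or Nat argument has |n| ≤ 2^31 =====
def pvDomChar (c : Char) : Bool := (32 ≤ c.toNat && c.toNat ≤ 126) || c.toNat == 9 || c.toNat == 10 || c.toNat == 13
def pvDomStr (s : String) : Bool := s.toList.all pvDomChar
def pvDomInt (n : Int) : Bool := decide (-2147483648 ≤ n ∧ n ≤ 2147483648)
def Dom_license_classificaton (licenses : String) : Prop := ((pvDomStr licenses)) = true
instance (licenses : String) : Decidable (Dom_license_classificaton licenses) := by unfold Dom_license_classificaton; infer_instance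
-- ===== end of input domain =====

-- B replaces A's priority-dict / running-min accumulator with an ordered first-match scan over
-- the three tiers (simpler decomposition; same asymptotic cost).

-- ===== PORT A =====
-- license_categories / priority / severity_map fused as A's dicts are iterated together:
-- (patterns, priority, severity_map entry), in the dict's insertion order.
def aCategories : List (List String × Int × (String × String)) :=
  [ (["GPL", "AGPL"], 1,
      ("High", "This package contains copyleft licenses, which impose strong obligations.")),
    (["LGPL", "MPL", "EPL", "CDDL"], 2,
      ("Medium", "This package contains weak copyleft licenses, which impose moderate obligations.")),
    (["MIT", "BSD", "Apache"], 3,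
      ("Informational", "This package contains permissive licenses, which impose minimal obligations.")) ]

-- (split? with sep "," is always `some`; `.getD []` unwraps it exactly)
-- `p < current_priority` where current_priority starts at float("inf"); `none` stands for inf
-- (every finite Int is < inf, exactly Python's float('inf') comparison on these values).
def pltInf (p : Int) (cp : Option Int) : Bool :=
  match cp with
  | none => true
  | some q => decide (p < q)

-- body of `for license in license_list:` (inner `for category, patterns in …` is the fold)
def aStep (st : Option Int × String × String) (lic : String) : Option Int × String × String :=
  aCategories.foldl (fun st cat =>
    if cat.1.any (fun pat =>
          PySem.Str.startswith (PySem.Str.upper lic) (PySem.Str.upper pat)) && pltInf cat.2.1 st.1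
    then (some cat.2.1, cat.2.2)
    else st) st

def license_classificaton (licenses : String) : String × String :=
  let license_list := ((PySem.Str.split? licenses ",").getD []).map PySem.Str.strip
  let final := license_list.foldl aStep (none, "Informational", "PURL identification for OSSBOMER")
  final.2

-- ===== PORT B =====
def bTiers : List (List String × (String × String)) :=
  [ (["GPL", "AGPL"],
      ("High", "This package contains copyleft licenses, which impose strong obligations.")),
    (["LGPL", "MPL", "EPL", "CDDL"],
      ("Medium", "This package contains weak copyleft licenses, which impose moderate obligations.")),
    (["MIT", "BSD", "Apache"],
      ("Informational", "This package contains permissive licenses, which impose minimal obligations.")) ]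

def bMatch (license_list : List String) (pats : List String) : Bool :=
  license_list.any (fun lic => pats.any (fun pat =>
    PySem.Str.startswith (PySem.Str.upper lic) (PySem.Str.upper pat)))

-- `for patterns, result in tiers: if any(...): return result` — first-match early return
def bScan (license_list : List String) : List (List String × (String × String)) → String × String
  | [] => ("Informational", "PURL identification for OSSBOMER")
  | (pats, res) :: rest =>
      if bMatch license_list pats then res else bScan license_list rest

def license_classificaton_alt (licenses : String) : String × String :=
  bScan (((PySem.Str.split? licenses ",").getD []).map PySem.Str.strip) bTiers

-- ===== PRECONDITION & SPEC =====
def Spec_license_classificaton (licenses : String) (out : String × String) : Prop := out = license_classificaton_alt licenses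
instance (licenses : String) (out : String × String) : Decidable (Spec_license_classificaton licenses out) := by unfold Spec_license_classificaton; infer_instance

-- ===== CLAIM (what is proved, stated in full; the proofs are below) =====
def Claim_equal_license_classificaton : Prop := ∀ (licenses : String), Dom_license_classificaton licenses → Spec_license_classificaton licenses (license_classificaton licenses)

-- ===== LEMMAS AND PROOFS =====

set_option maxHeartbeats 1000000

-- whether a single license matches pattern list `pats`
def pvMatch1 (pats : List String) (lic : String) : Bool :=
  pats.any (fun pat => PySem.Str.startswith (PySem.Str.upper lic) (PySem.Str.upper pat))

def pvC : List String := ["GPL", "AGPL"]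
def pvW : List String := ["LGPL", "MPL", "EPL", "CDDL"]
def pvP : List String := ["MIT", "BSD", "Apache"]

def pvS1 : Option Int × String × String :=
  (some 1, "High", "This package contains copyleft licenses, which impose strong obligations.")
def pvS2 : Option Int × String × String :=
  (some 2, "Medium", "This package contains weak copyleft licenses, which impose moderate obligations.")
def pvS3 : Option Int × String × String :=
  (some 3, "Informational", "This package contains permissive licenses, which impose minimal obligations.")

theorem pvStep_eq (l : String) (cp : Option Int) (sv rs : String) :
    aStep (cp, sv, rs) l =
      if pvMatch1 pvC l && pltInf 1 cp then pvS1
      else if pvMatch1 pvW l && pltInf 2 cp then pvS2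
      else if pvMatch1 pvP l && pltInf 3 cp then pvS3
      else (cp, sv, rs) := by
  show (aCategories.foldl _ (cp, sv, rs)) = _
  simp only [aCategories, List.foldl]
  rcases cp with _ | q <;>
    by_cases hC : pvMatch1 pvC l <;>
    by_cases hW : pvMatch1 pvW l <;>
    by_cases hP : pvMatch1 pvP l <;>
    simp_all [pvMatch1, pvC, pvW, pvP, pvS1, pvS2, pvS3, pltInf] <;>
    split_ifs <;> simp_all

-- characterisation of A's accumulator fold: the running min over the whole list
theorem pvFoldA (ls : List String) (cp : Option Int) (sv rs : String) :
    ls.foldl aStep (cp, sv, rs) =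
      if ls.any (pvMatch1 pvC) && pltInf 1 cp then pvS1
      else if ls.any (pvMatch1 pvW) && pltInf 2 cp then pvS2
      else if ls.any (pvMatch1 pvP) && pltInf 3 cp then pvS3
      else (cp, sv, rs) := by
  induction ls generalizing cp sv rs with
  | nil => simp
  | cons l ls ih =>
      rw [List.foldl_cons, pvStep_eq]
      rcases cp with _ | q
      · by_cases hC : pvMatch1 pvC l <;> by_cases hW : pvMatch1 pvW l <;>
          by_cases hP : pvMatch1 pvP l <;>
          simp [hC, hW, hP, pltInf, ih, pvS1, pvS2, pvS3]
      · by_cases hC : pvMatch1 pvC l <;> by_cases hW : pvMatch1 pvW l <;>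
          by_cases hP : pvMatch1 pvP l <;>
          by_cases h1 : (1:Int) < q <;> by_cases h2 : (2:Int) < q <;> by_cases h3 : (3:Int) < q <;>
          first
            | (exfalso; omega)
            | simp [hC, hW, hP, h1, h2, h3, pltInf, ih, pvS1, pvS2, pvS3]

theorem pvScanB (ls : List String) :
    bScan ls bTiers =
      if ls.any (pvMatch1 pvC) then pvS1.2
      else if ls.any (pvMatch1 pvW) then pvS2.2
      else if ls.any (pvMatch1 pvP) then pvS3.2
      else ("Informational", "PURL identification for OSSBOMER") := by
  simp [bTiers, bScan, bMatch, pvMatch1, pvC, pvW, pvP, pvS1, pvS2, pvS3]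

-- ===== VERDICT (by name: the statement is the Claim_ definition above) =====
theorem license_classificaton_spec : Claim_equal_license_classificaton := by
  intro licenses _
  show license_classificaton licenses = license_classificaton_alt licenses
  show (List.foldl aStep (none, "Informational", "PURL identification for OSSBOMER")
          (List.map PySem.Str.strip ((PySem.Str.split? licenses ",").getD []))).2 =
        bScan (List.map PySem.Str.strip ((PySem.Str.split? licenses ",").getD [])) bTiers
  rw [pvFoldA, pvScanB]
  split_ifs <;> simp_all [pltInf, pvS1, pvS2, pvS3]
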